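-- pv_equiv track=rewrite | github.com/mu-mino/yt-bulk | upload.py | _cap_tags_by_total_chars
-- ===== SOURCE A (Python) =====
-- def _cap_tags_by_total_chars(tags, max_total_chars=450):
--     """
--     Cap tags to YouTube's documented 500-character limit for snippet.tags[].
--
--     Docs nuance: commas between list items count toward the limit, and tags containing spaces
--     are treated as if quoted, so the quotes count too.
--     """
--
--     def _effective_len(tag: str) -> int:
--         # See videos resource docs for snippet.tags[] character counting rules.
--         return len(tag) + (2 if " " in tag else 0)
--
--     out = []
--     total = 0
--     for t in tags:
--         extra = _effective_len(t) + (1 if out else 0)  # comma separator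
--         if total + extra > max_total_chars:
--             break
--         out.append(t)
--         total += extra
--     return out
-- ===== SOURCE B (Python) =====
-- def _cap_tags_by_total_chars(tags, max_total_chars=450):
--     """Prefix-sum table + binary search instead of a running-total scan with break."""
--
--     def _effective_len(tag):
--         return len(tag) + (2 if " " in tag else 0)
--
--     # cumulative[i] = total effective chars of tags[: i + 1] (comma before every tag but the first)
--     cumulative = []
--     running = 0
--     for i, t in enumerate(tags):
--         running += _effective_len(t) + (1 if i else 0)
--         cumulative.append(running)
--
--     # bisect_right(cumulative, max_total_chars): the table is non-decreasing,
--     # so the number of prefixes that fit is found by binary search.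
--     lo, hi = 0, len(cumulative)
--     while lo < hi:
--         mid = (lo + hi) // 2
--         if max_total_chars < cumulative[mid]:
--             hi = mid
--         else:
--             lo = mid + 1
--     return tags[:lo]
-- ===== Notes on version B (the rewrite author's own statement) =====
-- stated objective: alternative
-- what changed: Replaces the running-total scan with early break by building a monotone prefix-sum table of effective tag costs and binary-searching (bisect_right) it for the number of tags that fit, then slicing.
import Mathlib
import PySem

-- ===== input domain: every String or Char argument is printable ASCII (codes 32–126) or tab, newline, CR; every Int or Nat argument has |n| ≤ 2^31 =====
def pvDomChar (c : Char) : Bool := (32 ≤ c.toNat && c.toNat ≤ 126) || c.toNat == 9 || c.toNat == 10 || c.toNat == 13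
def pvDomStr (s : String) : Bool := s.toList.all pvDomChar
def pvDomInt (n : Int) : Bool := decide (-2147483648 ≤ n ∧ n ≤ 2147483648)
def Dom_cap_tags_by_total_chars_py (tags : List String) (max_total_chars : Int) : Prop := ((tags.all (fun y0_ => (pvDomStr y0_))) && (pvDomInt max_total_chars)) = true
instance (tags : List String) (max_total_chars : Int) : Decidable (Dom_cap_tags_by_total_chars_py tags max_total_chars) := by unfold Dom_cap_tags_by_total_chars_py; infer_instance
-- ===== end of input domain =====

-- B replaces A's running-total scan with a prefix-sum table plus binary search (alternative decomposition, same cost).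

-- ===== PORT A =====
def pvEffA (tag : String) : Int :=
  PySem.Str.len tag + (if PySem.Str.isIn " " tag then 2 else 0)

def pvLoopA (max_total_chars : Int) : List String → List String → Int → List String
  | [], out, _ => out
  | t :: ts, out, total =>
    let extra := pvEffA t + (if out ≠ [] then 1 else 0)
    if total + extra > max_total_chars then out
    else pvLoopA max_total_chars ts (out ++ [t]) (total + extra)

def cap_tags_by_total_chars_py (tags : List String) (max_total_chars : Int) : List String :=
  pvLoopA max_total_chars tags [] 0

-- ===== PORT B =====
def pvEffB (tag : String) : Int :=
  PySem.Str.len tag + (if PySem.Str.isIn " " tag then 2 else 0)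

-- the `for i, t in enumerate(tags): running += …; cumulative.append(running)` loop
def pvCumLoop (running : Int) : List (Int × String) → List Int
  | [] => []
  | (i, t) :: rest =>
    let r := running + (pvEffB t + (if i ≠ 0 then 1 else 0))
    r :: pvCumLoop r rest

-- the hand-written bisect_right loop of Source B; cumulative[mid] is in range (0 ≤ mid < hi ≤ len), ported as getD
def pvBisect (a : List Int) (x : Int) (lo hi : Nat) : Nat :=
  if _h : lo < hi then
    if x < a.getD ((lo + hi) / 2) 0 then pvBisect a x lo ((lo + hi) / 2)
    else pvBisect a x ((lo + hi) / 2 + 1) hi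
  else lo
termination_by hi - lo
decreasing_by all_goals omega

def cap_tags_by_total_chars_py_alt (tags : List String) (max_total_chars : Int) : List String :=
  let cumulative := pvCumLoop 0 (PySem.List.enumerate tags)
  let lo := pvBisect cumulative max_total_chars 0 cumulative.length
  PySem.List.slice tags none (some (lo : Int))

-- ===== PRECONDITION & SPEC =====
def Spec_cap_tags_by_total_chars_py (tags : List String) (max_total_chars : Int) (out : List String) : Prop := out = cap_tags_by_total_chars_py_alt tags max_total_chars
instance (tags : List String) (max_total_chars : Int) (out : List String) : Decidable (Spec_cap_tags_by_total_chars_py tags max_total_chars out) := by unfold Spec_cap_tags_by_total_chars_py; infer_instance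

-- ===== CLAIM (what is proved, stated in full; the proofs are below) =====
def Claim_equal_cap_tags_by_total_chars_py : Prop := ∀ (tags : List String) (max_total_chars : Int), Dom_cap_tags_by_total_chars_py tags max_total_chars → Spec_cap_tags_by_total_chars_py tags max_total_chars (cap_tags_by_total_chars_py tags max_total_chars)

-- ===== LEMMAS AND PROOFS =====

-- greedy count of A's loop once `out` is nonempty (every further tag costs eff + 1)
def pvGT (mx : Int) : Int → List String → Nat
  | _, [] => 0
  | total, t :: ts =>
    if total + (pvEffA t + 1) > mx then 0 else pvGT mx (total + (pvEffA t + 1)) ts + 1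

-- prefix sums of the per-tag costs eff + 1, starting from a budget already spent
def pvCums : Int → List String → List Int
  | _, [] => []
  | r, t :: ts => (r + (pvEffA t + 1)) :: pvCums (r + (pvEffA t + 1)) ts

theorem pvEff_eq : pvEffB = pvEffA := rfl

theorem pvEff_nonneg (t : String) : 0 ≤ pvEffA t := by
  simp only [pvEffA, PySem.Str.len_eq]
  split <;> positivity

theorem pvCumLoop_enum (ts : List String) (r : Int) (s : Int) (hs : 1 ≤ s) :
    pvCumLoop r (PySem.List.enumerate ts s) = pvCums r ts := by
  induction ts generalizing r s with
  | nil => simp [PySem.List.enumerate_nil, pvCumLoop, pvCums]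
  | cons t ts ih =>
    rw [PySem.List.enumerate_cons]
    simp only [pvCumLoop, pvCums, pvEff_eq]
    rw [if_pos (by omega)]
    exact congrArg _ (ih _ _ (by omega))

theorem pvCums_length (ts : List String) (r : Int) : (pvCums r ts).length = ts.length := by
  induction ts generalizing r with
  | nil => rfl
  | cons t ts ih => simp [pvCums, ih]

theorem pvCums_ge (ts : List String) (r : Int) : ∀ y ∈ pvCums r ts, r ≤ y := by
  induction ts generalizing r with
  | nil => simp [pvCums]
  | cons t ts ih =>
    intro y hy
    have h0 := pvEff_nonneg t
    simp only [pvCums, List.mem_cons] at hy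
    rcases hy with h | h
    · omega
    · have := ih _ _ h; omega

theorem pvCums_sorted (ts : List String) (r : Int) : (pvCums r ts).Pairwise (· ≤ ·) := by
  induction ts generalizing r with
  | nil => simp [pvCums]
  | cons t ts ih =>
    simp only [pvCums, List.pairwise_cons]
    exact ⟨fun y hy => pvCums_ge ts _ y hy, ih _⟩

-- sorted list: index-monotone
theorem pv_sorted_mono (a : List Int) (hs : a.Pairwise (· ≤ ·)) (i j : Nat)
    (hij : i ≤ j) (hj : j < a.length) : a[i]'(by omega) ≤ a[j] := by
  rcases Nat.lt_or_ge i j with h | h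
  · exact (List.pairwise_iff_getElem.mp hs) i j (by omega) hj h
  · have : i = j := by omega
    subst this; exact le_refl _

-- the binary search returns any m with the bisect_right characterisation
theorem pvBisect_eq (a : List Int) (x : Int) (hs : a.Pairwise (· ≤ ·)) (m : Nat)
    (hm : m ≤ a.length)
    (hlt : ∀ j (hj : j < a.length), j < m → a[j] ≤ x)
    (hge : ∀ (hj : m < a.length), x < a[m]) :
    ∀ lo hi, lo ≤ m → m ≤ hi → hi ≤ a.length → pvBisect a x lo hi = m := by
  intro lo hi
  induction lo, hi using pvBisect.induct a x with
  | case1 lo hi h hcmp ih =>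
    intro h1 h2 h3
    have hmidlt : (lo + hi) / 2 < a.length := by omega
    rw [List.getD_eq_getElem a 0 hmidlt] at hcmp
    rw [pvBisect, dif_pos h, List.getD_eq_getElem a 0 hmidlt, if_pos hcmp]
    have hmle : m ≤ (lo + hi) / 2 := by
      by_contra hc
      have := hlt _ hmidlt (by omega)
      omega
    exact ih h1 hmle (by omega)
  | case2 lo hi h hcmp ih =>
    intro h1 h2 h3
    have hmidlt : (lo + hi) / 2 < a.length := by omega
    rw [List.getD_eq_getElem a 0 hmidlt] at hcmp
    rw [pvBisect, dif_pos h, List.getD_eq_getElem a 0 hmidlt, if_neg hcmp]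
    have hmgt : (lo + hi) / 2 + 1 ≤ m := by
      by_contra hc
      have hmlen : m < a.length := by omega
      have hmono := pv_sorted_mono a hs m ((lo + hi) / 2) (by omega) hmidlt
      have hx := hge hmlen
      omega
    exact ih hmgt h2 h3
  | case3 lo hi h =>
    intro h1 h2 h3
    rw [pvBisect, dif_neg h]
    omega

-- greedy count matches the bisect_right characterisation on the prefix-sum table
theorem pvGT_char (mx : Int) (ts : List String) (total : Int) :
    pvGT mx total ts ≤ ts.length ∧
    (∀ j, j < pvGT mx total ts → (pvCums total ts).getD j 0 ≤ mx) ∧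
    (pvGT mx total ts < ts.length → mx < (pvCums total ts).getD (pvGT mx total ts) 0) := by
  induction ts generalizing total with
  | nil => simp [pvGT, pvCums]
  | cons t ts ih =>
    simp only [pvGT, pvCums]
    by_cases hb : total + (pvEffA t + 1) > mx
    · rw [if_pos hb]
      refine ⟨by omega, by omega, ?_⟩
      intro _
      simpa using hb
    · rw [if_neg hb]
      obtain ⟨ih1, ih2, ih3⟩ := ih (total + (pvEffA t + 1))
      refine ⟨by simp; omega, ?_, ?_⟩
      · intro j hjm
        cases j with
        | zero => simpa using (by omega : total + (pvEffA t + 1) ≤ mx)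
        | succ j => simpa using ih2 j (by omega)
      · intro hj
        simpa using ih3 (by simpa using hj)

-- A's loop, once out ≠ [], appends the greedy-count prefix of the rest
theorem pvLoopA_eq (mx : Int) (ts : List String) (out : List String) (total : Int)
    (hout : out ≠ []) :
    pvLoopA mx ts out total = out ++ ts.take (pvGT mx total ts) := by
  induction ts generalizing out total with
  | nil => simp [pvLoopA, pvGT]
  | cons t ts ih =>
    simp only [pvLoopA, pvGT, if_pos hout]
    by_cases hb : total + (pvEffA t + 1) > mx
    · rw [if_pos hb, if_pos hb]; simp
    · rw [if_neg hb, if_neg hb]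
      rw [ih (out ++ [t]) _ (by simp)]
      simp

-- ===== VERDICT (by name: the statement is the Claim_ definition above) =====
theorem cap_tags_by_total_chars_py_spec : Claim_equal_cap_tags_by_total_chars_py := by
  intro tags mx _
  unfold Spec_cap_tags_by_total_chars_py
  unfold cap_tags_by_total_chars_py cap_tags_by_total_chars_py_alt
  cases tags with
  | nil =>
    simp [pvLoopA, PySem.List.enumerate_nil, pvCumLoop, pvBisect, PySem.List.slice]
  | cons t ts =>
    have hcum : pvCumLoop 0 (PySem.List.enumerate (t :: ts)) =
        (pvEffA t) :: pvCums (pvEffA t) ts := by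
      rw [PySem.List.enumerate_cons]
      simp only [pvCumLoop, pvEff_eq]
      rw [if_neg (by simp), zero_add, add_zero]
      rw [pvCumLoop_enum ts _ (0 + 1) (by omega)]
    have hsorted : (pvEffA t :: pvCums (pvEffA t) ts).Pairwise (· ≤ ·) := by
      rw [List.pairwise_cons]
      exact ⟨fun y hy => pvCums_ge ts _ y hy, pvCums_sorted ts _⟩
    simp only [hcum]
    obtain ⟨hc1, hc2, hc3⟩ := pvGT_char mx ts (pvEffA t)
    have hlen : (pvEffA t :: pvCums (pvEffA t) ts).length = ts.length + 1 := by
      simp [pvCums_length]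
    by_cases hb : pvEffA t > mx
    · -- first tag does not fit: both sides are []
      have hk : pvBisect (pvEffA t :: pvCums (pvEffA t) ts) mx 0
          (pvEffA t :: pvCums (pvEffA t) ts).length = 0 :=
        pvBisect_eq _ mx hsorted 0 (by omega) (by omega)
          (fun _ => by simpa using hb) 0 _ (by omega) (by omega) (by omega)
      rw [hk]
      simp only [pvLoopA]
      rw [if_pos (by simpa using hb)]
      simp [PySem.List.slice]
    · -- first tag fits: A keeps t plus the greedy prefix; B's search lands at the same cut
      have hk : pvBisect (pvEffA t :: pvCums (pvEffA t) ts) mx 0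
          (pvEffA t :: pvCums (pvEffA t) ts).length = pvGT mx (pvEffA t) ts + 1 := by
        refine pvBisect_eq _ mx hsorted _ (by rw [hlen]; omega) ?_ ?_ 0 _ (by omega) (by rw [hlen]; omega) (by omega)
        · intro j hj hjm
          cases j with
          | zero => simpa using (by omega : pvEffA t ≤ mx)
          | succ j =>
            have hj' : j < (pvCums (pvEffA t) ts).length := by
              simp only [List.length_cons] at hj; omega
            have := hc2 j (by omega)
            rw [List.getD_eq_getElem _ 0 hj'] at this
            simpa using this
        · intro hj
          have hj' : pvGT mx (pvEffA t) ts < (pvCums (pvEffA t) ts).length := by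
            simp only [List.length_cons, pvCums_length] at hj; rw [pvCums_length]; omega
          have := hc3 (by rw [pvCums_length] at hj'; omega)
          rw [List.getD_eq_getElem _ 0 hj'] at this
          simpa using this
      rw [hk]
      simp only [pvLoopA]
      rw [if_neg (by simpa using hb)]
      rw [if_neg (show ¬(([] : List String) ≠ []) by simp), List.nil_append, add_zero, zero_add]
      rw [pvLoopA_eq mx ts [t] _ (by simp)]
      rw [PySem.List.slice_to_natCast]
      simp [List.take_succ_cons]
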